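-- pv_equiv track=rewrite | github.com/Tina-starry/OECT_prediction | Mobilityprediction.py | Get_N_COS2
-- ===== SOURCE A (Python) =====
-- def Get_N_COS2(COS2,N):#获取分子总长为N的COS2序列
--     COS2_2=[]
--     for i in range(len(COS2)):
--         a=[]
--         for j in range(N):
--             a.append(COS2[i][j%len(COS2[i])])
--         COS2_2.append(a)
--     return COS2_2
-- ===== SOURCE B (Python) =====
-- def Get_N_COS2(COS2, N):
--     if N <= 0:
--         return [[] for _ in COS2]
--     return [(row * -(-N // len(row)))[:N] for row in COS2]
-- ===== Notes on version B (the rewrite author's own statement) =====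
-- stated objective: simpler
-- what changed: Replaces the inner per-element loop with modulo indexing by a closed-form tiling: each row is repeated ceil(N/len(row)) times and sliced to N, with an early return of empty rows for N <= 0.
import Mathlib
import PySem

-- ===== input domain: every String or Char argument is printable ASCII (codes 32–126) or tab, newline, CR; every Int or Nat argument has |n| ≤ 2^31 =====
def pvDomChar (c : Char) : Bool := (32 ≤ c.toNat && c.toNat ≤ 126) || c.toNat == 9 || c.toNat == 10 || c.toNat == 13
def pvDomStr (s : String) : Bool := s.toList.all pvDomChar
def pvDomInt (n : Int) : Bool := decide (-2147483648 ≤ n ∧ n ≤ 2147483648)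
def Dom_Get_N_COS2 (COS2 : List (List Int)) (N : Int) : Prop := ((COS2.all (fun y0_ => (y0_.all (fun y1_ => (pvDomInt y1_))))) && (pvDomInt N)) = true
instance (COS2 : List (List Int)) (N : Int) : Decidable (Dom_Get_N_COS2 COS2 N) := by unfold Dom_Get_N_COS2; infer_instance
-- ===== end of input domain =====

-- B replaces A's per-element modulo-index inner loop by a closed-form list replication plus slice (row * ceil(N/len) then [:N]); objective: simpler.

-- ===== PORT A =====
def Get_N_COS2 (COS2 : List (List Int)) (N : Int) : List (List Int) :=
  (PySem.List.pyRange 0 (COS2.length : Int) 1).foldl (fun COS2_2 i =>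
    COS2_2 ++ [(PySem.List.pyRange 0 N 1).foldl (fun a j =>
      a ++ [PySem.List.pyGetD (PySem.List.pyGetD COS2 i [])
              (PySem.Int.mod j ((PySem.List.pyGetD COS2 i []).length : Int)) 0]) []]) []

-- ===== PORT B =====
def Get_N_COS2_alt (COS2 : List (List Int)) (N : Int) : List (List Int) :=
  if N ≤ 0 then COS2.map (fun _ => [])
  else COS2.map (fun row =>
    PySem.List.slice
      (PySem.List.pyRepeat row (-(PySem.Int.floordiv (-N) (row.length : Int))))
      none (some N))

-- ===== PRECONDITION & SPEC =====
-- Pre_ excludes exactly the inputs where A raises ZeroDivisionError (j % len of an empty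
-- sublist, reached only when N > 0); B's division raises there too.
def Pre_Get_N_COS2 (COS2 : List (List Int)) (N : Int) : Prop := N ≤ 0 ∨ ¬ ([] ∈ COS2)
instance (COS2 : List (List Int)) (N : Int) : Decidable (Pre_Get_N_COS2 COS2 N) := by unfold Pre_Get_N_COS2; infer_instance
def pvWitness_Get_N_COS2 : List (List Int) × Int := ([[1, 2], [3]], 5)

def Spec_Get_N_COS2 (COS2 : List (List Int)) (N : Int) (out : List (List Int)) : Prop := out = Get_N_COS2_alt COS2 N
instance (COS2 : List (List Int)) (N : Int) (out : List (List Int)) : Decidable (Spec_Get_N_COS2 COS2 N out) := by unfold Spec_Get_N_COS2; infer_instance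

-- ===== CLAIM (what is proved, stated in full; the proofs are below) =====
def Claim_equal_Get_N_COS2 : Prop := ∀ (COS2 : List (List Int)) (N : Int), Dom_Get_N_COS2 COS2 N → Pre_Get_N_COS2 COS2 N → Spec_Get_N_COS2 COS2 N (Get_N_COS2 COS2 N)

-- ===== LEMMAS AND PROOFS =====

-- A's outer loop is a map of its inner loop over the rows.
theorem getN_eq_map (COS2 : List (List Int)) (N : Int) :
    Get_N_COS2 COS2 N = COS2.map (fun row =>
      (PySem.List.pyRange 0 N 1).foldl (fun a j =>
        a ++ [PySem.List.pyGetD row (PySem.Int.mod j (row.length : Int)) 0]) []) := by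
  unfold Get_N_COS2
  rw [PySem.List.foldl_pyRange_zero_pyGetD' COS2 []
      (fun acc row => acc ++ [(PySem.List.pyRange 0 N 1).foldl (fun a j =>
        a ++ [PySem.List.pyGetD row (PySem.Int.mod j (row.length : Int)) 0]) []]) []]
  rw [PySem.List.foldl_append_singleton_eq_map]
  simp

-- first row.length picks of the cyclic index are a prefix of the row
theorem map_pick_take (row : List Int) (t : Nat) (ht : t ≤ row.length) :
    (List.range t).map (fun (k : Nat) =>
      PySem.List.pyGetD row (PySem.Int.mod (k : Int) (row.length : Int)) 0)
    = row.take t := by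
  apply List.ext_getElem
  · simp [ht]
  · intro i h1 h2
    simp only [List.getElem_map, List.getElem_range, List.getElem_take]
    rw [PySem.Int.mod_natCast i row.length, PySem.List.pyGetD_natCast]
    have hi : i < t := by simpa using h1
    rw [Nat.mod_eq_of_lt (lt_of_lt_of_le hi ht)]
    exact List.getD_eq_getElem row 0 _

-- cyclic picks of length t are the prefix of m tiled copies of the row, for any m with t ≤ m·len
theorem map_pick_eq_take_flatten (row : List Int) :
    ∀ (m t : Nat), t ≤ m * row.length →
    (List.range t).map (fun (k : Nat) =>
      PySem.List.pyGetD row (PySem.Int.mod (k : Int) (row.length : Int)) 0)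
    = ((List.replicate m row).flatten).take t := by
  intro m
  induction m with
  | zero => intro t ht; simp at ht; simp [ht]
  | succ m ih =>
    intro t ht
    have hflat : (List.replicate (m + 1) row).flatten = row ++ (List.replicate m row).flatten := by
      simp [List.replicate_succ]
    rw [hflat]
    have hmul : (m + 1) * row.length = m * row.length + row.length := by ring
    by_cases hc : t ≤ row.length
    · rw [List.take_append_of_le_length hc]
      exact map_pick_take row t hc
    · push_neg at hc
      rw [List.take_append, List.take_of_length_le (le_of_lt hc)]
      conv_lhs => rw [show t = row.length + (t - row.length) by omega]
      rw [List.range_add, List.map_append, List.map_map]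
      have hper : ((fun (k : Nat) =>
          PySem.List.pyGetD row (PySem.Int.mod (k : Int) (row.length : Int)) 0) ∘
          (fun k => row.length + k))
          = fun (k : Nat) =>
            PySem.List.pyGetD row (PySem.Int.mod (k : Int) (row.length : Int)) 0 := by
        funext k
        simp only [Function.comp]
        rw [PySem.Int.mod_natCast (row.length + k) row.length,
            PySem.Int.mod_natCast k row.length, Nat.add_mod_left]
      rw [hper]
      congr 1
      · simpa using map_pick_take row row.length le_rfl
      · exact ih (t - row.length) (by omega)

-- the ceiling multiplier is nonnegative and covers N
theorem ceil_covers (N n : Int) (hN : 0 < N) (hn : 0 < n) :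
    N ≤ (-(PySem.Int.floordiv (-N) n)) * n ∧ 0 < -(PySem.Int.floordiv (-N) n) := by
  set q := -(PySem.Int.floordiv (-N) n) with hq
  have hiff := (PySem.Int.neg_floordiv_neg_eq_iff_of_pos (a := N) (b := n) (q := q) hn).mp hq.symm
  refine ⟨hiff.2, ?_⟩
  by_contra hle
  push_neg at hle
  have : q * n ≤ 0 := mul_nonpos_of_nonpos_of_nonneg hle (le_of_lt hn)
  omega

theorem inner_eq (row : List Int) (N : Int) (hrow : row ≠ []) (hN : 0 < N) :
    (PySem.List.pyRange 0 N 1).foldl (fun a j =>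
      a ++ [PySem.List.pyGetD row (PySem.Int.mod j (row.length : Int)) 0]) []
    = PySem.List.slice
        (PySem.List.pyRepeat row (-(PySem.Int.floordiv (-N) (row.length : Int))))
        none (some N) := by
  have hn : 0 < (row.length : Int) := by
    have : 0 < row.length := List.length_pos_iff.mpr hrow
    exact_mod_cast this
  obtain ⟨hcov, hqpos⟩ := ceil_covers N (row.length : Int) hN hn
  set q := -(PySem.Int.floordiv (-N) (row.length : Int)) with hq
  rw [PySem.List.foldl_append_singleton_eq_map, List.nil_append,
      PySem.List.pyRange_one, List.map_map]
  have hfun : ((fun j => PySem.List.pyGetD row (PySem.Int.mod j (row.length : Int)) 0) ∘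
      (fun k : Nat => (0 : Int) + k))
      = fun k : Nat => PySem.List.pyGetD row (PySem.Int.mod (k : Int) (row.length : Int)) 0 := by
    funext k; simp [Function.comp]
  rw [hfun]
  have ht : (N - 0).toNat ≤ q.toNat * row.length := by
    have hcast : ((q.toNat * row.length : Nat) : Int) = q * (row.length : Int) := by
      push_cast
      rw [Int.toNat_of_nonneg (le_of_lt hqpos)]
    have h2 : ((N - 0).toNat : Int) ≤ ((q.toNat * row.length : Nat) : Int) := by
      rw [hcast]; omega
    exact_mod_cast h2
  rw [map_pick_eq_take_flatten row q.toNat (N - 0).toNat ht]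
  rw [PySem.List.slice_to _ (le_of_lt hN)]
  unfold PySem.List.pyRepeat
  congr 1
  omega

-- ===== VERDICT (by name: the statement is the Claim_ definition above) =====
theorem Get_N_COS2_spec : Claim_equal_Get_N_COS2 := by
  intro COS2 N _ hpre
  unfold Spec_Get_N_COS2
  rw [getN_eq_map]
  unfold Get_N_COS2_alt
  by_cases hN : N ≤ 0
  · simp only [if_pos hN]
    apply List.map_congr_left
    intro row _
    have hvac : PySem.List.pyRange 0 N 1 = [] := by
      rw [PySem.List.pyRange_one, Int.toNat_eq_zero.mpr (by omega : N - 0 ≤ 0)]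
      simp
    rw [hvac]; rfl
  · simp only [if_neg hN]
    push_neg at hN
    apply List.map_congr_left
    intro row hmem
    have hrow : row ≠ [] := by
      rcases hpre with h | h
      · omega
      · intro he; exact h (he ▸ hmem)
    exact inner_eq row N hrow hN
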